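-- pv_equiv track=rewrite | github.com/lducas/CodeRed | weights.py | weights_fundamental_domain
-- ===== SOURCE A (Python) =====
-- import operator as op
-- from functools import reduce
--
-- def comb(n, r):
--     r = min(r, n-r)
--     numer = reduce(op.mul, range(n, n-r, -1), 1)
--     denom = reduce(op.mul, range(1, r+1), 1)
--     return numer // denom
--
-- def convol(A, B):
--     C = [0 for i in range(len(A)+len(B))]
--     for x in range(len(A)):
--         for y in range(len(B)):
--             C[x+y] += A[x]*B[y]
--     return C
--
-- def weights_fundamental_ball(n):
--     if n%2 > 0:
--         L = [comb(n, i) for i in range((n+1)//2)]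
--     else:
--         L = [comb(n, i) for i in range((n+1)//2)] + [comb(n, (n+1)//2)//2]
--     return L
--
-- def weights_fundamental_domain(profile):
--     fundamental_balls = [weights_fundamental_ball(int(l)) for l in profile]
--     n = sum(profile)
--     k = len(profile)
--     C = fundamental_balls[0]
--     for i in range(1, k):
--         C = convol(C, fundamental_balls[i])
--     return C
-- ===== SOURCE B (Python) =====
-- def _ball(n):
--     # binomials by the multiplicative recurrence, one pass
--     half = (n + 1) // 2
--     row = []
--     c = 1
--     for i in range(half):
--         row.append(c)
--         c = c * (n - i) // (i + 1)
--     if n % 2 == 0: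
--         row.append(c // 2)
--     return row
--
-- def _mul(A, B):
--     # coefficient-indexed convolution
--     la, lb = len(A), len(B)
--     return [sum(A[x] * B[j - x] for x in range(max(0, j - lb + 1), min(j + 1, la)))
--             for j in range(la + lb)]
--
-- def weights_fundamental_domain(profile):
--     polys = [_ball(int(l)) for l in profile]
--     while len(polys) > 1:
--         polys = [_mul(polys[i], polys[i + 1]) if i + 1 < len(polys) else polys[i]
--                  for i in range(0, len(polys), 2)]
--     return polys[0]
-- ===== Notes on version B (the rewrite author's own statement) =====
-- stated objective: alternative
-- what changed: B builds each ball row with the multiplicative binomial recurrence instead of an independent product-quotient comb per entry, computes each convolution coefficient directly by an output-indexed sum instead of accumulating into a zero list with nested input-indexed loops, and multiplies the polynomials in a balanced pairwise tree instead of a left fold.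
import Mathlib
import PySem

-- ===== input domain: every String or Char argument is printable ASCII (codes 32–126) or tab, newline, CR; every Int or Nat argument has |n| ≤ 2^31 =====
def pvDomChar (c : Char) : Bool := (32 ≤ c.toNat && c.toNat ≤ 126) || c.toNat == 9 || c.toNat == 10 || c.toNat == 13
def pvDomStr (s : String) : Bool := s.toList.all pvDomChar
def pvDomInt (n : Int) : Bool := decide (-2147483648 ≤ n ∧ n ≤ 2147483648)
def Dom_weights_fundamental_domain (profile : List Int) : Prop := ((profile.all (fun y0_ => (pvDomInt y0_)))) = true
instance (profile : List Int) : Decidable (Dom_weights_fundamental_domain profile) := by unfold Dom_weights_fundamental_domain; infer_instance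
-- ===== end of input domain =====

-- B multiplies the ball polynomials in a balanced pairwise tree with a coefficient-indexed
-- convolution and builds each ball row by the multiplicative binomial recurrence (alternative
-- decomposition, same exact values); return value only.


-- ===== PORT A =====
-- comb(n, r)
def combA (n r : Int) : Int :=
  let r' := min r (n - r)
  let numer := (PySem.List.pyRange n (n - r') (-1)).foldl (· * ·) 1
  let denom := (PySem.List.pyRange 1 (r' + 1) 1).foldl (· * ·) 1
  PySem.Int.floordiv numer denom

-- weights_fundamental_ball(n)
def ballA (n : Int) : List Int :=
  if PySem.Int.mod n 2 > 0 then
    (PySem.List.pyRange 0 (PySem.Int.floordiv (n + 1) 2) 1).map (fun i => combA n i)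
  else
    (PySem.List.pyRange 0 (PySem.Int.floordiv (n + 1) 2) 1).map (fun i => combA n i)
      ++ [PySem.Int.floordiv (combA n (PySem.Int.floordiv (n + 1) 2)) 2]

-- convol(A, B): C of zeros, then C[x+y] += A[x]*B[y] (indices are always in range)
def convolA (A B : List Int) : List Int :=
  let C := (PySem.List.pyRange 0 (PySem.List.len A + PySem.List.len B) 1).map (fun _ => (0 : Int))
  (PySem.List.pyRange 0 (PySem.List.len A) 1).foldl (fun C x =>
    (PySem.List.pyRange 0 (PySem.List.len B) 1).foldl (fun C y =>
      PySem.List.pySetD C (x + y)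
        (PySem.List.pyGetD C (x + y) 0 + PySem.List.pyGetD A x 0 * PySem.List.pyGetD B y 0)) C) C

-- int(l) on an int is the identity
def weights_fundamental_domain (profile : List Int) : List Int :=
  let fundamental_balls := profile.map (fun l => ballA l)
  let _n := profile.sum
  let k := PySem.List.len profile
  let C := PySem.List.pyGetD fundamental_balls 0 []   -- fundamental_balls[0]; Pre_ gives profile ≠ []
  (PySem.List.pyRange 1 k 1).foldl (fun C i => convolA C (PySem.List.pyGetD fundamental_balls i [])) C

-- ===== PORT B =====
-- _ball(n): binomial row by the multiplicative recurrence
def ballB (n : Int) : List Int :=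
  let half := PySem.Int.floordiv (n + 1) 2
  let rc := (PySem.List.pyRange 0 half 1).foldl
      (fun (rc : List Int × Int) i =>
        (rc.1 ++ [rc.2], PySem.Int.floordiv (rc.2 * (n - i)) (i + 1))) ([], 1)
  if PySem.Int.mod n 2 = 0 then rc.1 ++ [PySem.Int.floordiv rc.2 2] else rc.1

-- _mul(A, B): coefficient-indexed convolution
def mulB (A B : List Int) : List Int :=
  let la := PySem.List.len A
  let lb := PySem.List.len B
  (PySem.List.pyRange 0 (la + lb) 1).map (fun j =>
    ((PySem.List.pyRange (max 0 (j - lb + 1)) (min (j + 1) la) 1).map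
      (fun x => PySem.List.pyGetD A x 0 * PySem.List.pyGetD B (j - x) 0)).sum)

-- one pass of '[_mul(polys[i], polys[i+1]) if i+1 < len(polys) else polys[i] for i in range(0, len(polys), 2)]'
def pairPassB : List (List Int) → List (List Int)
  | a :: b :: rest => mulB a b :: pairPassB rest
  | xs => xs

theorem length_pairPassB_le (ps : List (List Int)) : (pairPassB ps).length ≤ ps.length := by
  induction ps using pairPassB.induct <;> simp [pairPassB] at * <;> omega

theorem length_pairPassB_lt (ps : List (List Int)) (h : 1 < ps.length) :
    (pairPassB ps).length < ps.length := by
  match ps, h with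
  | a :: b :: rest, _ =>
    have := length_pairPassB_le rest
    simp only [pairPassB, List.length_cons]
    omega

-- the 'while len(polys) > 1' loop
def reduceB (ps : List (List Int)) : List (List Int) :=
  if h : 1 < ps.length then reduceB (pairPassB ps) else ps
termination_by ps.length
decreasing_by exact length_pairPassB_lt ps h

def weights_fundamental_domain_alt (profile : List Int) : List Int :=
  let polys := profile.map (fun l => ballB l)
  PySem.List.pyGetD (reduceB polys) 0 []

-- ===== PRECONDITION & SPEC =====
-- A raises IndexError on the empty profile (fundamental_balls[0]); that is all Pre_ excludes.
def Pre_weights_fundamental_domain (profile : List Int) : Prop :=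
  profile ≠ []
instance (profile : List Int) : Decidable (Pre_weights_fundamental_domain profile) := by
  unfold Pre_weights_fundamental_domain; infer_instance

def pvWitness_weights_fundamental_domain : List Int := [3, 2]

def Spec_weights_fundamental_domain (profile : List Int) (out : List Int) : Prop :=
  out = weights_fundamental_domain_alt profile
instance (profile : List Int) (out : List Int) : Decidable (Spec_weights_fundamental_domain profile out) := by
  unfold Spec_weights_fundamental_domain; infer_instance

-- ===== CLAIM (what is proved, stated in full; the proofs are below) =====
def Claim_equal_weights_fundamental_domain : Prop :=
  ∀ (profile : List Int), Dom_weights_fundamental_domain profile →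
    Pre_weights_fundamental_domain profile →
    Spec_weights_fundamental_domain profile (weights_fundamental_domain profile)

-- ===== LEMMAS AND PROOFS =====

-- coefficient view of an integer list, and its polynomial
def cf (L : List Int) (j : ℕ) : Int := L.getD j 0

noncomputable def toP (L : List Int) : Polynomial ℤ :=
  ∑ i ∈ Finset.range L.length, Polynomial.C (cf L i) * Polynomial.X ^ i

theorem cf_eq_getElem (L : List Int) (j : ℕ) (h : j < L.length) : cf L j = L[j] := by
  simp [cf, List.getD_eq_getElem?_getD, List.getElem?_eq_getElem h]

theorem cf_of_le (L : List Int) (j : ℕ) (h : L.length ≤ j) : cf L j = 0 := by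
  simp [cf, List.getD_eq_getElem?_getD, List.getElem?_eq_none_iff.2 h]

theorem coeff_toP (L : List Int) (j : ℕ) : (toP L).coeff j = cf L j := by
  simp only [toP, Polynomial.finset_sum_coeff, Polynomial.coeff_C_mul, Polynomial.coeff_X_pow,
    mul_ite, mul_one, mul_zero]
  rw [Finset.sum_ite_eq (Finset.range L.length) j (fun i => cf L i)]
  by_cases h : j < L.length
  · simp [h]
  · simp [h, cf_of_le L j (by omega)]

theorem eq_of_toP {L1 L2 : List Int} (hl : L1.length = L2.length) (hp : toP L1 = toP L2) :
    L1 = L2 := by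
  refine List.ext_getElem hl (fun j h1 h2 => ?_)
  have := congrArg (fun p => Polynomial.coeff p j) hp
  simpa [coeff_toP, cf_eq_getElem _ _ h1, cf_eq_getElem _ _ h2] using this

theorem toP_coeff_mul (A B : List Int) (j : ℕ) :
    (toP A * toP B).coeff j = ∑ x ∈ Finset.range (j + 1), cf A x * cf B (j - x) := by
  rw [Polynomial.coeff_mul, Finset.Nat.sum_antidiagonal_eq_sum_range_succ_mk]
  simp [coeff_toP]

theorem mulcoeff_zero (A B : List Int) (j : ℕ) (h : A.length + B.length ≤ j) :
    (toP A * toP B).coeff j = 0 := by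
  rw [toP_coeff_mul]
  refine Finset.sum_eq_zero (fun x hx => ?_)
  by_cases hA : x < A.length
  · rw [cf_of_le B (j - x) (by omega), mul_zero]
  · rw [cf_of_le A x (by omega), zero_mul]

-- both convolutions compute this canonical product list
noncomputable def padMul (A B : List Int) : List Int :=
  (List.range (A.length + B.length)).map (fun j => (toP A * toP B).coeff j)

theorem length_padMul (A B : List Int) : (padMul A B).length = A.length + B.length := by
  simp [padMul]

theorem cf_padMul (A B : List Int) (j : ℕ) : cf (padMul A B) j = (toP A * toP B).coeff j := by
  by_cases h : j < A.length + B.length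
  · rw [cf_eq_getElem _ _ (by simpa [length_padMul])]
    simp [padMul]
  · rw [cf_of_le _ _ (by simpa [length_padMul] using le_of_not_gt h),
      mulcoeff_zero A B j (by omega)]

theorem toP_padMul (A B : List Int) : toP (padMul A B) = toP A * toP B :=
  Polynomial.ext (fun j => by rw [coeff_toP, cf_padMul])

-- ---- characterizing A's convol ----

theorem cf_set (L : List Int) (n : ℕ) (v : Int) (j : ℕ) :
    cf (L.set n v) j = if j = n ∧ n < L.length then v else cf L j := by
  simp only [cf, List.getD_eq_getElem?_getD, List.getElem?_set]
  by_cases hj : j = n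
  · subst hj
    by_cases hn : j < L.length <;> simp [hn]
  · simp [Ne.symm hj, hj]

theorem convol_inner (A B : List Int) (x : ℕ) (b : ℕ) (C : List Int)
    (hb : b ≤ B.length) (hC : x + b ≤ C.length) :
    ∃ C', ((PySem.List.pyRange 0 (b : Int) 1).foldl (fun C y =>
        PySem.List.pySetD C ((x : Int) + y)
          (PySem.List.pyGetD C ((x : Int) + y) 0 +
            PySem.List.pyGetD A (x : Int) 0 * PySem.List.pyGetD B y 0)) C) = C' ∧
      C'.length = C.length ∧
      ∀ j : ℕ, cf C' j = cf C j +
        (if x ≤ j ∧ j < x + b then cf A x * cf B (j - x) else 0) := by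
  induction b generalizing C with
  | zero =>
    exact ⟨C, by simp [PySem.List.pyRange_zero_nat], rfl,
      fun j => by rw [if_neg (by omega)]; ring⟩
  | succ m ih =>
    obtain ⟨C', hfold, hlen, hcf⟩ := ih C (by omega) (by omega)
    have hrange : PySem.List.pyRange 0 ((m : Int) + 1) 1 =
        PySem.List.pyRange 0 (m : Int) 1 ++ [(m : Int)] :=
      PySem.List.pyRange_one_succ_right (by positivity)
    have hxm : x + m < C'.length := by omega
    refine ⟨C'.set (x + m) (cf C' (x + m) + cf A x * cf B m), ?_, ?_, ?_⟩
    · rw [show ((m + 1 : ℕ) : Int) = (m : Int) + 1 by push_cast; ring, hrange,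
        List.foldl_append, hfold]
      simp only [List.foldl_cons, List.foldl_nil]
      rw [show ((x : Int) + (m : Int)) = ((x + m : ℕ) : Int) by push_cast; ring,
        PySem.List.pySetD_natCast, PySem.List.pyGetD_natCast, PySem.List.pyGetD_natCast,
        PySem.List.pyGetD_natCast]
      rfl
    · simp [hlen]
    · intro j
      rw [cf_set]
      by_cases hj : j = x + m
      · subst hj
        rw [if_pos ⟨rfl, hxm⟩, hcf (x + m), if_neg (by omega), if_pos (by omega)]
        simp [Nat.add_sub_cancel_left]
      · rw [if_neg (by tauto), hcf j]
        congr 1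
        by_cases h1 : x ≤ j ∧ j < x + m
        · rw [if_pos h1, if_pos (by omega)]
        · rw [if_neg h1, if_neg (by omega)]

theorem convol_outer (A B : List Int) (a : ℕ) (C : List Int)
    (ha : a ≤ A.length) (hC : A.length + B.length ≤ C.length) :
    ∃ C', ((PySem.List.pyRange 0 (a : Int) 1).foldl (fun C x =>
        (PySem.List.pyRange 0 (PySem.List.len B) 1).foldl (fun C y =>
          PySem.List.pySetD C (x + y)
            (PySem.List.pyGetD C (x + y) 0 +
              PySem.List.pyGetD A x 0 * PySem.List.pyGetD B y 0)) C) C) = C' ∧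
      C'.length = C.length ∧
      ∀ j : ℕ, cf C' j = cf C j +
        ∑ x ∈ Finset.range a,
          (if x ≤ j ∧ j < x + B.length then cf A x * cf B (j - x) else 0) := by
  induction a generalizing C with
  | zero => exact ⟨C, by simp [PySem.List.pyRange_zero_nat], rfl, fun j => by simp⟩
  | succ m ih =>
    obtain ⟨C', hfold, hlen, hcf⟩ := ih C (by omega) hC
    have hblen : PySem.List.len B = ((B.length : ℕ) : Int) := by simp [PySem.List.len_eq]
    obtain ⟨C'', hfold2, hlen2, hcf2⟩ :=
      convol_inner A B m B.length C' le_rfl (by omega)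
    have hrange : PySem.List.pyRange 0 ((m : Int) + 1) 1 =
        PySem.List.pyRange 0 (m : Int) 1 ++ [(m : Int)] :=
      PySem.List.pyRange_one_succ_right (by positivity)
    refine ⟨C'', ?_, by omega, fun j => ?_⟩
    · rw [show ((m + 1 : ℕ) : Int) = (m : Int) + 1 by push_cast; ring, hrange,
        List.foldl_append, hfold, List.foldl_cons, List.foldl_nil, hblen, hfold2]
    · rw [hcf2 j, hcf j, Finset.sum_range_succ]; ring

theorem sum_ind_eq (A B : List Int) (j : ℕ) :
    ∑ x ∈ Finset.range A.length,
      (if x ≤ j ∧ j < x + B.length then cf A x * cf B (j - x) else 0)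
    = ∑ x ∈ Finset.range (j + 1), cf A x * cf B (j - x) := by
  have h1 : ∑ x ∈ Finset.range A.length,
      (if x ≤ j ∧ j < x + B.length then cf A x * cf B (j - x) else 0)
    = ∑ x ∈ Finset.range (A.length + j + 1),
      (if x ≤ j ∧ j < x + B.length then cf A x * cf B (j - x) else 0) := by
    refine Finset.sum_subset (by intro x hx; simp only [Finset.mem_range] at *; omega) (fun x hx hnx => ?_)
    have hxA : A.length ≤ x := by simpa using hnx
    split_ifs with hcond
    · rw [cf_of_le A x hxA, zero_mul]
    · rfl
  have h2 : ∑ x ∈ Finset.range (j + 1), cf A x * cf B (j - x)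
    = ∑ x ∈ Finset.range (A.length + j + 1),
      (if x ≤ j then cf A x * cf B (j - x) else 0) := by
    rw [← Finset.sum_filter]
    congr 1
    ext x
    simp only [Finset.mem_range, Finset.mem_filter]
    omega
  rw [h1, h2]
  refine Finset.sum_congr rfl (fun x hx => ?_)
  simp only [Finset.mem_range] at hx
  by_cases hle : x ≤ j
  · by_cases hb : j < x + B.length
    · rw [if_pos ⟨hle, hb⟩, if_pos hle]
    · rw [if_neg (by tauto), if_pos hle, cf_of_le B (j - x) (by omega), mul_zero]
  · rw [if_neg (by tauto), if_neg hle]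

theorem convolA_eq_padMul (A B : List Int) : convolA A B = padMul A B := by
  have hzeros : ((PySem.List.pyRange 0 (PySem.List.len A + PySem.List.len B) 1).map
      (fun _ => (0 : Int))) = List.replicate (A.length + B.length) (0 : Int) := by
    rw [show PySem.List.len A + PySem.List.len B = ((A.length + B.length : ℕ) : Int) by
      simp [PySem.List.len_eq]]
    rw [PySem.List.pyRange_zero_nat]
    simp [List.map_map, List.eq_replicate_iff]
  have hlenA : PySem.List.len A = ((A.length : ℕ) : Int) := by simp [PySem.List.len_eq]
  obtain ⟨C', hfold, hlen, hcf⟩ := convol_outer A B A.length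
    (List.replicate (A.length + B.length) (0 : Int)) le_rfl (by simp)
  have : convolA A B = C' := by
    rw [convolA]; rw [hzeros, hlenA, hfold]
  rw [this]
  refine eq_of_toP (by simp [hlen, length_padMul]) (Polynomial.ext fun j => ?_)
  rw [coeff_toP, coeff_toP, cf_padMul, hcf j, toP_coeff_mul, sum_ind_eq]
  simp only [cf, List.getD_eq_getElem?_getD, List.getElem?_replicate]
  split_ifs <;> simp

-- ---- characterizing B's _mul ----

theorem sum_map_range (n : ℕ) (f : ℕ → ℤ) :
    ((List.range n).map f).sum = ∑ i ∈ Finset.range n, f i := rfl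

theorem sum_map_pyRange_natCast (g : Int → Int) (lo hi : ℕ) :
    ((PySem.List.pyRange (lo : Int) (hi : Int) 1).map g).sum
      = ∑ x ∈ Finset.Ico lo hi, g (x : Int) := by
  rw [PySem.List.pyRange_one, List.map_map]
  rw [show ((hi : Int) - (lo : Int)).toNat = hi - lo by omega]
  rw [Finset.sum_Ico_eq_sum_range, ← sum_map_range]
  refine congrArg List.sum (List.map_congr_left fun k _ => ?_)
  simp only [Function.comp_apply]
  exact congrArg g (by push_cast; ring)

theorem mulB_eq_padMul (A B : List Int) : mulB A B = padMul A B := by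
  have hlen : PySem.List.len A + PySem.List.len B = ((A.length + B.length : ℕ) : Int) := by
    simp [PySem.List.len_eq]
  rw [mulB, padMul, hlen, PySem.List.pyRange_zero_nat, List.map_map]
  refine List.map_congr_left (fun j hj => ?_)
  simp only [List.mem_range] at hj
  simp only [Function.comp]
  -- rewrite the two bounds as casts of their ℕ values
  have hlo : max 0 ((j : Int) - PySem.List.len B + 1) = ((j + 1 - B.length : ℕ) : Int) := by
    simp only [PySem.List.len_eq]; omega
  have hhi : min ((j : Int) + 1) (PySem.List.len A) = ((min (j + 1) A.length : ℕ) : Int) := by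
    simp only [PySem.List.len_eq]; omega
  rw [hlo, hhi, sum_map_pyRange_natCast]
  have hsub : Finset.Ico (j + 1 - B.length) (min (j + 1) A.length) ⊆ Finset.range (j + 1) := by
    intro x hx; simp only [Finset.mem_Ico] at hx; simp only [Finset.mem_range]; omega
  rw [toP_coeff_mul]
  rw [← Finset.sum_subset hsub (fun x hx hnx => ?_)]
  · refine Finset.sum_congr rfl (fun x hx => ?_)
    simp only [Finset.mem_Ico] at hx
    rw [show (j : Int) - (x : Int) = ((j - x : ℕ) : Int) by omega]
    simp [PySem.List.pyGetD_natCast, cf]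
  · simp only [Finset.mem_range] at hnx hx
    simp only [Finset.mem_Ico, not_and_or, not_le, not_lt] at hnx
    rcases hnx with h | h
    · rw [cf_of_le B (j - x) (by omega), mul_zero]
    · rw [cf_of_le A x (by omega), zero_mul]

-- ---- the two ball computations both list binomial coefficients ----

theorem foldl_mul_append (l : List Int) (e : Int) (i : Int) :
    (l ++ [e]).foldl (· * ·) i = l.foldl (· * ·) i * e := by
  simp [List.foldl_append]

theorem numer_desc (N R : ℕ) (h : R ≤ N) :
    (PySem.List.pyRange (N : Int) ((N - R : ℕ) : Int) (-1)).foldl (· * ·) 1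
      = ((N.descFactorial R : ℕ) : Int) := by
  rw [PySem.List.pyRange_neg_one]
  rw [show ((N : Int) - ((N - R : ℕ) : Int)).toNat = R by omega]
  induction R with
  | zero => simp
  | succ m ih =>
    rw [List.range_succ, List.map_append, List.map_cons, List.map_nil, foldl_mul_append,
      ih (by omega), Nat.descFactorial_succ]
    rw [Nat.cast_mul, Nat.cast_sub (by omega : m ≤ N)]
    ring

theorem denom_fact (R : ℕ) :
    (PySem.List.pyRange 1 ((R : Int) + 1) 1).foldl (· * ·) 1 = ((R.factorial : ℕ) : Int) := by
  rw [PySem.List.pyRange_one]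
  rw [show ((R : Int) + 1 - 1).toNat = R by omega]
  induction R with
  | zero => simp
  | succ m ih =>
    rw [List.range_succ, List.map_append, List.map_cons, List.map_nil, foldl_mul_append, ih,
      Nat.factorial_succ]
    push_cast
    ring

theorem combA_choose (N R : ℕ) (h : R + R ≤ N) :
    combA (N : Int) (R : Int) = ((N.choose R : ℕ) : Int) := by
  rw [combA]
  have hmin : min (R : Int) ((N : Int) - (R : Int)) = (R : Int) := by omega
  simp only [hmin]
  rw [show (N : Int) - (R : Int) = ((N - R : ℕ) : Int) by omega]
  rw [numer_desc N R (by omega), denom_fact R, PySem.Int.floordiv_natCast,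
    ← Nat.choose_eq_descFactorial_div_factorial]

theorem ballB_loop (N m : ℕ) (hm : m + m ≤ N + 1) :
    (PySem.List.pyRange 0 (m : Int) 1).foldl
      (fun (rc : List Int × Int) i =>
        (rc.1 ++ [rc.2], PySem.Int.floordiv (rc.2 * ((N : Int) - i)) (i + 1))) ([], 1)
    = ((List.range m).map (fun i => ((N.choose i : ℕ) : Int)), ((N.choose m : ℕ) : Int)) := by
  induction m with
  | zero => simp [PySem.List.pyRange_zero_nat]
  | succ k ih =>
    have hrange : PySem.List.pyRange 0 ((k : Int) + 1) 1 =
        PySem.List.pyRange 0 (k : Int) 1 ++ [(k : Int)] :=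
      PySem.List.pyRange_one_succ_right (by positivity)
    rw [show ((k + 1 : ℕ) : Int) = (k : Int) + 1 by push_cast; ring, hrange,
      List.foldl_append, ih (by omega), List.foldl_cons, List.foldl_nil]
    have hkN : k ≤ N := by omega
    refine Prod.ext ?_ ?_
    · simp [List.range_succ]
    · simp only
      rw [show ((N.choose k : ℕ) : Int) * ((N : Int) - (k : Int))
          = ((N.choose k * (N - k) : ℕ) : Int) by push_cast [hkN]; ring]
      rw [show ((k : Int) + 1) = ((k + 1 : ℕ) : Int) by push_cast; ring]
      rw [PySem.Int.floordiv_natCast, ← Nat.choose_succ_right_eq,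
        Nat.mul_div_cancel _ (by omega)]

theorem ballAB_eq_nonneg (n : Int) (hn : 0 ≤ n) : ballA n = ballB n := by
  obtain ⟨N, rfl⟩ : ∃ N : ℕ, n = (N : Int) := ⟨n.toNat, by omega⟩
  have hhalf : PySem.Int.floordiv ((N : Int) + 1) 2 = (((N + 1) / 2 : ℕ) : Int) := by
    rw [show ((N : Int) + 1) = ((N + 1 : ℕ) : Int) by push_cast; ring,
      show (2 : Int) = ((2 : ℕ) : Int) by norm_num, PySem.Int.floordiv_natCast]
  have hmod : PySem.Int.mod (N : Int) 2 = ((N % 2 : ℕ) : Int) := by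
    rw [show (2 : Int) = ((2 : ℕ) : Int) by norm_num, PySem.Int.mod_natCast]
  have hrow : ((PySem.List.pyRange 0 (((N + 1) / 2 : ℕ) : Int) 1).map (fun i => combA (N : Int) i))
      = (List.range ((N + 1) / 2)).map (fun i => ((N.choose i : ℕ) : Int)) := by
    rw [PySem.List.pyRange_zero_nat, List.map_map]
    refine List.map_congr_left (fun i hi => ?_)
    simp only [List.mem_range] at hi
    exact combA_choose N i (by omega)
  rw [ballA, ballB]
  simp only [hhalf, hmod, hrow, ballB_loop N ((N + 1) / 2) (by omega)]
  by_cases hpar : N % 2 = 0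
  · rw [if_neg (by simp [hpar]), if_pos (by simp [hpar])]
    congr 2
    rw [combA_choose N ((N + 1) / 2) (by omega),
      show (2 : Int) = ((2 : ℕ) : Int) by norm_num, PySem.Int.floordiv_natCast]
  · rw [if_pos (by omega), if_neg (by omega)]

theorem ballAB_eq (n : Int) : ballA n = ballB n := by
  rcases le_or_gt 0 n with hn | hn
  · exact ballAB_eq_nonneg n hn
  · -- n < 0: A's ranges are all empty, both sides give [] (odd n) or [0] (even n)
    have hhalf : PySem.Int.floordiv (n + 1) 2 = (n + 1) / 2 :=
      PySem.Int.floordiv_eq_ediv_of_pos (by norm_num)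
    have hmod : PySem.Int.mod n 2 = n % 2 :=
      PySem.Int.mod_eq_emod_of_pos (by norm_num)
    have hrangeA : PySem.List.pyRange 0 (PySem.Int.floordiv (n + 1) 2) 1 = [] := by
      rw [hhalf]
      exact PySem.List.pyRange_one_eq_nil (by omega)
    rw [ballA, ballB, hrangeA]
    simp only [List.map_nil, List.foldl_nil]
    by_cases hpar : n % 2 = 0
    · -- even negative n
      have hcomb : combA n (PySem.Int.floordiv (n + 1) 2) = 1 := by
        rw [combA, hhalf]
        have hmin : min ((n + 1) / 2) (n - (n + 1) / 2) = (n + 1) / 2 := by omega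
        simp only [hmin]
        rw [PySem.List.pyRange_neg_one_eq_nil (by omega),
          PySem.List.pyRange_one_eq_nil (by omega)]
        decide
      rw [if_neg (by rw [hmod]; omega), if_pos (by rw [hmod]; omega), hcomb]
    · rw [if_pos (by rw [hmod]; omega), if_neg (by rw [hmod]; omega)]

-- ---- A's left fold and B's balanced tree both produce the canonical product ----

theorem foldA_props (rest : List (List Int)) (b0 : List Int) :
    toP (rest.foldl convolA b0) = toP b0 * (rest.map toP).prod ∧
      (rest.foldl convolA b0).length = b0.length + (rest.map List.length).sum := by
  induction rest generalizing b0 with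
  | nil => simp
  | cons c t ih =>
    obtain ⟨h1, h2⟩ := ih (convolA b0 c)
    refine ⟨?_, ?_⟩
    · rw [List.foldl_cons, h1, convolA_eq_padMul, toP_padMul]
      simp [mul_assoc]
    · rw [List.foldl_cons, h2, convolA_eq_padMul, length_padMul]
      simp
      omega

theorem pairPassB_props (ps : List (List Int)) :
    ((pairPassB ps).map toP).prod = (ps.map toP).prod ∧
      ((pairPassB ps).map List.length).sum = (ps.map List.length).sum := by
  induction ps using pairPassB.induct with
  | case1 a b rest ih =>
    obtain ⟨h1, h2⟩ := ih
    simp only [pairPassB, List.map_cons, List.prod_cons, List.sum_cons]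
    rw [h1, h2, mulB_eq_padMul, toP_padMul, length_padMul]
    constructor
    · ring
    · omega
  | case2 xs h =>
    rcases xs with _ | ⟨a, _ | ⟨b, rest⟩⟩
    · exact ⟨rfl, rfl⟩
    · exact ⟨rfl, rfl⟩
    · exact absurd rfl (h a b rest)

theorem reduceB_props (ps : List (List Int)) (h : ps ≠ []) :
    ∃ R, reduceB ps = [R] ∧ toP R = (ps.map toP).prod ∧
      R.length = (ps.map List.length).sum := by
  by_cases h1 : 1 < ps.length
  · have hlt := length_pairPassB_lt ps h1
    have hne : pairPassB ps ≠ [] := by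
      match ps, h1 with
      | a :: b :: rest, _ => simp [pairPassB]
    obtain ⟨R, hR, hp, hl⟩ := reduceB_props (pairPassB ps) hne
    obtain ⟨hprod, hsum⟩ := pairPassB_props ps
    exact ⟨R, by rw [reduceB, dif_pos h1, hR], by rw [hp, hprod], by rw [hl, hsum]⟩
  · rcases ps with _ | ⟨R, _ | ⟨y, t⟩⟩
    · exact absurd rfl h
    · exact ⟨R, by simp [reduceB], by simp, by simp⟩
    · exact absurd (by simp) h1
termination_by ps.length
decreasing_by exact length_pairPassB_lt ps h1

-- ===== VERDICT (by name: the statement is the Claim_ definition above) =====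
theorem weights_fundamental_domain_spec : Claim_equal_weights_fundamental_domain := by
  intro profile _ hne
  obtain ⟨b0, rest, rfl⟩ : ∃ b0 rest, profile = b0 :: rest := by
    match profile, hne with
    | p :: t, _ => exact ⟨p, t, rfl⟩
  have hballs : (b0 :: rest).map (fun l => ballA l) = (b0 :: rest).map (fun l => ballB l) :=
    List.map_congr_left (fun l _ => ballAB_eq l)
  unfold Spec_weights_fundamental_domain
  simp only [weights_fundamental_domain, weights_fundamental_domain_alt, hballs]
  set balls := (b0 :: rest).map (fun l => ballB l) with hballsdef
  have hlen : PySem.List.len (b0 :: rest) = PySem.List.len balls := by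
    simp [PySem.List.len_eq, hballsdef]
  rw [hlen, PySem.List.foldl_pyRange_pyGetD balls ([] : List Int)
    (fun C bi => convolA C bi) _ (by norm_num)]
  obtain ⟨R, hR, hRp, hRl⟩ := reduceB_props balls (by simp [hballsdef])
  rw [hR]
  have hballs_cons : balls = ballB b0 :: rest.map (fun l => ballB l) := by simp [hballsdef]
  rw [hballs_cons]
  simp only [PySem.List.pyGetD_zero_cons, List.drop_succ_cons, List.drop_zero,
    show (1 : Int).toNat = 1 from rfl]
  obtain ⟨hFp, hFl⟩ := foldA_props (rest.map (fun l => ballB l)) (ballB b0)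
  refine eq_of_toP ?_ ?_
  · rw [hFl, hRl, hballs_cons]; simp
  · rw [hFp, hRp, hballs_cons]; simp
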